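-- pv_equiv track=rewrite | github.com/lsh424/algorithm | Greedy/gym_wear.py | solution
-- ===== SOURCE A (Python) =====
-- def solution(n, lost, reserve):
--     rsv = list(set(reserve) - set(lost))
--     lost = list(set(lost) - set(reserve))
--
--     lost.sort()
--
--     for i in lost:
--         if i - 1 in rsv:
--             rsv.remove(i - 1)
--         elif i + 1 in rsv:
--             rsv.remove(i + 1)
--         else:
--             n -= 1
--
--     answer = n
--     return answer
-- ===== SOURCE B (Python) =====
-- def solution(n, lost, reserve):
--     ls = sorted(set(lost) - set(reserve))
--     rs = sorted(set(reserve) - set(lost))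
--     matched = 0
--     i = j = 0
--     while i < len(ls) and j < len(rs):
--         if rs[j] < ls[i] - 1:
--             j += 1                      # this reserve can never help any later student
--         elif rs[j] <= ls[i] + 1:        # rs[j] is ls[i]-1 or ls[i]+1 (the lists are disjoint)
--             matched += 1; i += 1; j += 1
--         else:
--             i += 1                      # no reserve close enough for this student
--     return n - len(ls) + matched
-- ===== Notes on version B (the rewrite author's own statement) =====
-- stated objective: faster
-- what changed: Replaces A's per-student linear membership tests and remove() calls on the reserve list by sorting both deduplicated lists once and matching with a single two-pointer sweep.
import Mathlib
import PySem

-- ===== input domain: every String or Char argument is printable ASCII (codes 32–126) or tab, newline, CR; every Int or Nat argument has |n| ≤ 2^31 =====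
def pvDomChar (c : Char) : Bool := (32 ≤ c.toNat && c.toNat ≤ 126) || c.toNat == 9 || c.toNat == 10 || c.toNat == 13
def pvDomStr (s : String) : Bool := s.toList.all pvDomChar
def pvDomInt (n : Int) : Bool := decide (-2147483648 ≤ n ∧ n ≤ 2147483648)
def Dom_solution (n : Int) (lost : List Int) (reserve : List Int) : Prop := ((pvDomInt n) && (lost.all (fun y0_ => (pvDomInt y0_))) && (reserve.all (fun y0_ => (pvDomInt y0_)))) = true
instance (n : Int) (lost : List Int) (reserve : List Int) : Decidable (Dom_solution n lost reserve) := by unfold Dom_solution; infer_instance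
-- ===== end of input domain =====

-- B replaces A's per-student membership scans over the reserve list by a single
-- two-pointer sweep over both sorted deduplicated lists (asymptotically faster, measured).


-- ===== PORT A =====
-- rsv = list(set(reserve) - set(lost)); lost = sorted(set(lost) - set(reserve));
-- then the for-loop over lost, carrying (rsv, n) as the mutable state.
-- (Python's list(set(..)) order is hash order; A only uses membership and remove,
-- so the returned int does not depend on that order — we take first-occurrence order.)
def solution (n : Int) (lost : List Int) (reserve : List Int) : Int :=
  let rsv : List Int := PySem.Set.diff (PySem.Set.ofList reserve) (PySem.Set.ofList lost)
  let lostL : List Int :=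
    PySem.List.sorted (PySem.Set.diff (PySem.Set.ofList lost) (PySem.Set.ofList reserve)) (fun x => x) false
  let st := lostL.foldl (fun (s : List Int × Int) i =>
    if s.1.contains (i - 1) then (s.1.erase (i - 1), s.2)
    else if s.1.contains (i + 1) then (s.1.erase (i + 1), s.2)
    else (s.1, s.2 - 1)) (rsv, n)
  st.2

-- ===== PORT B =====
-- the while-loop of Source B: advance through both sorted lists once, counting matches
def twoPtr : List Int → List Int → Int
  | [], _ => 0
  | _ :: _, [] => 0
  | i :: ls, r :: rs =>
    if r < i - 1 then twoPtr (i :: ls) rs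
    else if r ≤ i + 1 then 1 + twoPtr ls rs
    else twoPtr ls (r :: rs)
termination_by ls rs => ls.length + rs.length

def solution_alt (n : Int) (lost : List Int) (reserve : List Int) : Int :=
  let ls : List Int :=
    PySem.List.sorted (PySem.Set.diff (PySem.Set.ofList lost) (PySem.Set.ofList reserve)) (fun x => x) false
  let rs : List Int :=
    PySem.List.sorted (PySem.Set.diff (PySem.Set.ofList reserve) (PySem.Set.ofList lost)) (fun x => x) false
  n - (ls.length : Int) + twoPtr ls rs

-- ===== PRECONDITION & SPEC =====
def Spec_solution (n : Int) (lost : List Int) (reserve : List Int) (out : Int) : Prop := out = solution_alt n lost reserve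
instance (n : Int) (lost : List Int) (reserve : List Int) (out : Int) : Decidable (Spec_solution n lost reserve out) := by unfold Spec_solution; infer_instance

-- ===== CLAIM (what is proved, stated in full; the proofs are below) =====
def Claim_equal_solution : Prop := ∀ (n : Int) (lost : List Int) (reserve : List Int), Dom_solution n lost reserve → Spec_solution n lost reserve (solution n lost reserve)

-- ===== LEMMAS AND PROOFS =====

-- the number of unmatched lost students in A's loop, as a recursion
def lossA : List Int → List Int → Int
  | [], _ => 0
  | i :: L, S =>
    if S.contains (i - 1) then lossA L (S.erase (i - 1))
    else if S.contains (i + 1) then lossA L (S.erase (i + 1))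
    else 1 + lossA L S

theorem foldl_eq_lossA (L : List Int) (S : List Int) (n : Int) :
    (L.foldl (fun (s : List Int × Int) i =>
      if s.1.contains (i - 1) then (s.1.erase (i - 1), s.2)
      else if s.1.contains (i + 1) then (s.1.erase (i + 1), s.2)
      else (s.1, s.2 - 1)) (S, n)).2 = n - lossA L S := by
  induction L generalizing S n with
  | nil => simp [lossA]
  | cons i L ih =>
    simp only [List.foldl_cons, lossA]
    split_ifs with h1 h2 <;> rw [ih] <;> try ring

theorem lossA_perm (L : List Int) : ∀ S S' : List Int, S.Perm S' → lossA L S = lossA L S' := by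
  induction L with
  | nil => intro S S' _; simp [lossA]
  | cons i L ih =>
    intro S S' hp
    simp only [lossA, List.contains_eq_mem, decide_eq_true_eq]
    by_cases h1 : i - 1 ∈ S
    · rw [if_pos h1, if_pos (hp.mem_iff.mp h1)]
      exact ih _ _ (hp.erase _)
    · rw [if_neg h1, if_neg (fun hc => h1 (hp.mem_iff.mpr hc))]
      by_cases h2 : i + 1 ∈ S
      · rw [if_pos h2, if_pos (hp.mem_iff.mp h2)]
        exact ih _ _ (hp.erase _)
      · rw [if_neg h2, if_neg (fun hc => h2 (hp.mem_iff.mpr hc))]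
        rw [ih _ _ hp]

theorem lossA_nil (L : List Int) : lossA L [] = (L.length : Int) := by
  induction L with
  | nil => simp [lossA]
  | cons i L ih => simp [lossA, ih]; ring

theorem lossA_skip (r : Int) (L : List Int) : ∀ S : List Int, (∀ j ∈ L, r < j - 1) →
    lossA L (r :: S) = lossA L S := by
  induction L with
  | nil => intro S _; simp [lossA]
  | cons i L ih =>
    intro S h
    have hi : r < i - 1 := h i (by simp)
    have h' : ∀ j ∈ L, r < j - 1 := fun j hj => h j (by simp [hj])
    simp only [lossA, List.contains_eq_mem, List.mem_cons, decide_eq_true_eq]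
    have hne1 : ¬ (i - 1 = r) := by omega
    have hne2 : ¬ (i + 1 = r) := by omega
    rw [List.erase_cons_tail (by simpa using fun h => hne1 h.symm),
        List.erase_cons_tail (by simpa using fun h => hne2 h.symm)]
    simp only [eq_comm (a := i - 1) (b := r)] at *
    split_ifs with h1 h2 <;> simp_all

theorem lossA_twoPtr (k : Nat) : ∀ L S : List Int, L.length + S.length ≤ k →
    L.Pairwise (· < ·) → S.Pairwise (· < ·) → (∀ j ∈ L, j ∉ S) →
    twoPtr L S + lossA L S = (L.length : Int) := by
  induction k with
  | zero =>
    intro L S hk _ _ _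
    have : L = [] := by cases L <;> simp_all
    subst this; simp [twoPtr, lossA]
  | succ k ih =>
    intro L S hk hL hS hdisj
    match L, S with
    | [], S => simp [twoPtr, lossA]
    | i :: L, [] => simp [twoPtr, lossA_nil]
    | i :: L, r :: S =>
      have hSmin : ∀ x ∈ S, r < x := by
        intro x hx; exact (List.pairwise_cons.mp hS).1 x hx
      have hLmin : ∀ x ∈ L, i < x := by
        intro x hx; exact (List.pairwise_cons.mp hL).1 x hx
      have hri : r ≠ i := fun h => hdisj i (by simp) (by simp [h])
      simp only [twoPtr]
      split_ifs with h1 h2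
      · -- r < i - 1 : this reserve is dead; drop it on both sides
        have hskip : lossA (i :: L) (r :: S) = lossA (i :: L) S := by
          apply lossA_skip
          intro j hj
          rcases List.mem_cons.mp hj with h | h
          · omega
          · have := hLmin j h; omega
        rw [hskip]
        exact ih (i :: L) S (by simp at hk ⊢; omega) hL hS.tail
          (fun j hj => fun hc => hdisj j hj (by simp [hc]))
      · -- r = i - 1 or r = i + 1 : both match and consume (i, r)
        have hr : r = i - 1 ∨ r = i + 1 := by omega
        have hstep : lossA (i :: L) (r :: S) = lossA L S := by
          rcases hr with hr | hr
          · simp [lossA, List.contains_eq_mem, hr.symm]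
          · have hnot : (i - 1) ∉ r :: S := by
              simp only [List.mem_cons]
              push Not
              exact ⟨by omega, fun hc => by have := hSmin _ hc; omega⟩
            simp [lossA, List.contains_eq_mem, hnot, hr.symm]
        rw [hstep]
        have := ih L S (by simp at hk ⊢; omega) hL.tail hS.tail
          (fun j hj => fun hc => hdisj j (by simp [hj]) (by simp [hc]))
        simp at this ⊢; omega
      · -- r > i + 1 : student i is unmatched on both sides
        have hnot1 : (i - 1) ∉ r :: S := by
          simp only [List.mem_cons]; push Not
          exact ⟨by omega, fun hc => by have := hSmin _ hc; omega⟩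
        have hnot2 : (i + 1) ∉ r :: S := by
          simp only [List.mem_cons]; push Not
          exact ⟨by omega, fun hc => by have := hSmin _ hc; omega⟩
        have hstep : lossA (i :: L) (r :: S) = 1 + lossA L (r :: S) := by
          simp [lossA, List.contains_eq_mem, hnot1, hnot2]
        rw [hstep]
        have := ih L (r :: S) (by simp at hk ⊢; omega) hL.tail hS
          (fun j hj => hdisj j (by simp [hj]))
        simp at this ⊢; omega

-- sorted(set-difference) is strictly increasing
theorem sorted_diff_pairwise (xs ys : List Int) :
    (PySem.List.sorted (PySem.Set.diff (PySem.Set.ofList xs) (PySem.Set.ofList ys)) (fun x => x) false).Pairwise (· < ·) := by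
  have hnd : (PySem.Set.diff (PySem.Set.ofList xs) (PySem.Set.ofList ys)).Nodup :=
    PySem.Set.nodup_diff _ _ (PySem.Set.nodup_ofList _)
  have h := PySem.List.sorted_ofList_pairwise_lt (PySem.Set.diff (PySem.Set.ofList xs) (PySem.Set.ofList ys))
  rwa [PySem.Set.ofList_eq_self_of_nodup _ hnd] at h

-- ===== VERDICT (by name: the statement is the Claim_ definition above) =====
theorem solution_spec : Claim_equal_solution := by
  intro n lost reserve _
  unfold Spec_solution solution solution_alt
  simp only []
  set Ld := PySem.Set.diff (PySem.Set.ofList lost) (PySem.Set.ofList reserve) with hLd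
  set Sd := PySem.Set.diff (PySem.Set.ofList reserve) (PySem.Set.ofList lost) with hSd
  set L := PySem.List.sorted Ld (fun x => x) false with hL
  set S := PySem.List.sorted Sd (fun x => x) false with hS
  rw [foldl_eq_lossA]
  have hperm : Sd.Perm S := (PySem.List.sorted_perm _ _ _).symm
  rw [lossA_perm L Sd S hperm]
  have hLp : L.Pairwise (· < ·) := sorted_diff_pairwise lost reserve
  have hSp : S.Pairwise (· < ·) := sorted_diff_pairwise reserve lost
  have hdisj : ∀ j ∈ L, j ∉ S := by
    intro j hj hc
    have hj' : j ∈ Ld := (PySem.List.mem_sorted _ _ _ _).mp hj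
    have hc' : j ∈ Sd := (PySem.List.mem_sorted _ _ _ _).mp hc
    rw [hLd, PySem.Set.mem_diff] at hj'
    rw [hSd, PySem.Set.mem_diff] at hc'
    exact hj'.2 ((PySem.Set.mem_ofList _ _).mpr ((PySem.Set.mem_ofList _ _).mp hc'.1))
  have := lossA_twoPtr (L.length + S.length) L S le_rfl hLp hSp hdisj
  omega
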